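-- pv_equiv track=rewrite | github.com/Alaflipo/AdventOfCode | 2015/day5/day5.py | part2
-- ===== SOURCE A (Python) =====
-- def part2(input):
--     nice_counter = 0
--     for word in input:
--
--         doubles = False
--         spacing = False
--         for i, char in enumerate(word):
--             if (i + 2) < len(word) and char == word[i+2]:
--                 spacing = True
--             if (i + 1) < len(word) and word[i:i+2] in word[i+2:]:
--                 doubles += 1
--
--         if doubles and spacing:
--             nice_counter += 1
--
--     return nice_counter
-- ===== SOURCE B (Python) =====
-- def part2(input):
--     nice_counter = 0
--     for word in input:
--         n = len(word)
--         first = {}          # 2-char pair -> index of its first occurrence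
--         pair_ok = False
--         triple_ok = False
--         for j in range(n - 1):
--             if j + 2 < n and word[j] == word[j + 2]:
--                 triple_ok = True
--             p = (word[j], word[j + 1])
--             k = first.get(p)
--             if k is None:
--                 first[p] = j
--             elif j - k >= 2:
--                 pair_ok = True
--         if pair_ok and triple_ok:
--             nice_counter += 1
--     return nice_counter
-- ===== Notes on version B (the rewrite author's own statement) =====
-- stated objective: alternative
-- what changed: Per word, A runs a substring search `word[i:i+2] in word[i+2:]` at every index; B makes one pass keeping a dict from each 2-char pair to its first index and flags a non-overlapping repeat when the current index is >= 2 past that first index, fusing the spaced-repeat check into the same pass (O(n) per word vs A's quadratic scan, though not measurably faster on the benchmark's word lengths).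
import Mathlib
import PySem

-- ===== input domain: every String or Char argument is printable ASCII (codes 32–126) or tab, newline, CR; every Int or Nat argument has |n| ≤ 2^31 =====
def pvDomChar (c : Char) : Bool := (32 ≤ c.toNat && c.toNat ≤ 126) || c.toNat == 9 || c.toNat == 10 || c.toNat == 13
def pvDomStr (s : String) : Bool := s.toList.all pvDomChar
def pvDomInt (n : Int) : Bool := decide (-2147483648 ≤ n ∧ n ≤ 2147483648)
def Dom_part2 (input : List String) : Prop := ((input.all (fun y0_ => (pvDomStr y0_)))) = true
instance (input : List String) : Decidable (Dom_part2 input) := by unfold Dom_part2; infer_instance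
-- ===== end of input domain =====

-- B replaces A's per-word repeated substring search (`word[i:i+2] in word[i+2:]` at every index)
-- by a single pass keeping a dict from each 2-char pair to its first index; objective: alternative algorithm.

-- ===== PORT A =====
-- per-word inner loop of A: state (doubles : Int, spacing : Bool); Python's `doubles = False; doubles += 1`
-- is an int counter starting at 0, and `if doubles` tests it ≠ 0.
def part2NiceA (l : List Char) : Bool :=
  let st := (List.range l.length).foldl (fun (st : Int × Bool) i =>
      let st := if i + 2 < l.length && (l.getD i ' ' == l.getD (i + 2) ' ')
                then (st.1, true) else st
      if i + 1 < l.length &&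
         PySem.Chars.isIn (PySem.List.slice l (some (i : Int)) (some ((i : Int) + 2)))
                          (PySem.List.slice l (some ((i : Int) + 2)) none)
      then (st.1 + 1, st.2) else st)
    ((0 : Int), false)
  st.1 != 0 && st.2

def part2 (input : List String) : Int :=
  input.foldl (fun nice_counter word =>
    if part2NiceA word.toList then nice_counter + 1 else nice_counter) 0

-- ===== PORT B =====
-- per-word step of B's single pass: state (first : pair → first index, pair_ok, triple_ok).
-- Loop indices are Nat; Python's `j - k >= 2` agrees with Nat subtraction because k ≤ j always holds here.
def part2BStep (l : List Char) (st : PySem.Dict (Char × Char) Nat × Bool × Bool) (j : Nat) :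
    PySem.Dict (Char × Char) Nat × Bool × Bool :=
  let tripleOk := if j + 2 < l.length && (l.getD j ' ' == l.getD (j + 2) ' ') then true else st.2.2
  match st.1.get? (l.getD j ' ', l.getD (j + 1) ' ') with
  | none => (st.1.insert (l.getD j ' ', l.getD (j + 1) ' ') j, st.2.1, tripleOk)
  | some k => (st.1, if 2 ≤ j - k then true else st.2.1, tripleOk)

def part2NiceB (l : List Char) : Bool :=
  let st := (List.range (l.length - 1)).foldl (part2BStep l) (PySem.Dict.empty, false, false)
  st.2.1 && st.2.2

def part2_alt (input : List String) : Int :=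
  input.foldl (fun nice_counter word =>
    if part2NiceB word.toList then nice_counter + 1 else nice_counter) 0

-- ===== PRECONDITION & SPEC =====
def Spec_part2 (input : List String) (out : Int) : Prop := out = part2_alt input
instance (input : List String) (out : Int) : Decidable (Spec_part2 input out) := by unfold Spec_part2; infer_instance

-- ===== CLAIM (what is proved, stated in full; the proofs are below) =====
def Claim_equal_part2 : Prop := ∀ (input : List String), Dom_part2 input → Spec_part2 input (part2 input)

-- ===== LEMMAS AND PROOFS =====

def pairAt (l : List Char) (i : Nat) : Char × Char := (l.getD i ' ', l.getD (i + 1) ' ')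
def DoubP (l : List Char) : Prop := ∃ i j, i + 2 ≤ j ∧ j + 1 < l.length ∧ pairAt l i = pairAt l j
def SpP (l : List Char) : Prop := ∃ i, i + 2 < l.length ∧ l.getD i ' ' = l.getD (i + 2) ' '

def condA1 (l : List Char) (i : Nat) : Bool := i + 2 < l.length && (l.getD i ' ' == l.getD (i + 2) ' ')
def condA2 (l : List Char) (i : Nat) : Bool :=
  i + 1 < l.length && PySem.Chars.isIn ((l.drop i).take 2) (l.drop (i + 2))

lemma pair_prefix_iff (a b : Char) (t : List Char) :
    ([a,b] <+: t) ↔ 2 ≤ t.length ∧ t.getD 0 ' ' = a ∧ t.getD 1 ' ' = b := by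
  match t with
  | [] => simp
  | [x] => simp [List.cons_prefix_iff]
  | x :: y :: r => simp [List.cons_prefix_iff, eq_comm]

lemma getD_drop (l : List Char) (i m : Nat) : (l.drop i).getD m ' ' = l.getD (i+m) ' ' := by
  simp [List.getD_eq_getElem?_getD, List.getElem?_drop]

lemma take_two (t : List Char) (h : 2 ≤ t.length) : t.take 2 = [t.getD 0 ' ', t.getD 1 ' '] := by
  match t with
  | [] => simp at h
  | [x] => simp at h
  | x :: y :: r => simp

lemma slice_pair (l : List Char) (i : Nat) :
    PySem.List.slice l (some (i : Int)) (some ((i : Int) + 2)) = (l.drop i).take 2 := by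
  have h := PySem.List.slice_natCast l i (i+2)
  push_cast at h
  simpa using h

lemma slice_tail (l : List Char) (i : Nat) :
    PySem.List.slice l (some ((i : Int) + 2)) none = l.drop (i+2) := by
  have h := PySem.List.slice_from l (a := (i : Int) + 2) (by positivity)
  simpa using h

lemma condA2_iff (l : List Char) (i : Nat) :
    condA2 l i = true ↔ i + 1 < l.length ∧ ∃ j, i + 2 ≤ j ∧ j + 1 < l.length ∧ pairAt l j = pairAt l i := by
  unfold condA2
  simp only [Bool.and_eq_true, decide_eq_true_eq]
  constructor
  · rintro ⟨h1, hin⟩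
    refine ⟨h1, ?_⟩
    obtain ⟨j, hpre⟩ := (PySem.Chars.exists_prefix_drop_iff_isIn _ _).mpr hin
    rw [take_two _ (by simp; omega), getD_drop, getD_drop, List.drop_drop] at hpre
    rw [pair_prefix_iff] at hpre
    obtain ⟨hlen, he0, he1⟩ := hpre
    simp at hlen
    simp only [Nat.add_zero] at he0 he1
    refine ⟨i + 2 + j, by omega, by omega, ?_⟩
    simp [pairAt, List.getD_eq_getElem?_getD] at he0 he1 ⊢
    exact ⟨he0, he1⟩
  · rintro ⟨h1, j, hij, hj, heq⟩
    refine ⟨h1, ?_⟩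
    rw [← PySem.Chars.exists_prefix_drop_iff_isIn]
    refine ⟨j - (i + 2), ?_⟩
    rw [take_two _ (by simp; omega), getD_drop, getD_drop, List.drop_drop]
    rw [pair_prefix_iff, getD_drop, getD_drop]
    simp only [Nat.add_zero]
    rw [show i + 2 + (j - (i+2)) = j from by omega]
    simp [pairAt, Prod.ext_iff, List.getD_eq_getElem?_getD] at heq
    refine ⟨by simp; omega, heq.1, heq.2⟩

lemma condA1_iff (l : List Char) (i : Nat) :
    condA1 l i = true ↔ i + 2 < l.length ∧ l.getD i ' ' = l.getD (i + 2) ' ' := by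
  unfold condA1
  simp

lemma foldA_eq (l : List Char) :
    (List.range l.length).foldl (fun (st : Int × Bool) i =>
      let st := if i + 2 < l.length && (l.getD i ' ' == l.getD (i + 2) ' ')
                then (st.1, true) else st
      if i + 1 < l.length &&
         PySem.Chars.isIn (PySem.List.slice l (some (i : Int)) (some ((i : Int) + 2)))
                          (PySem.List.slice l (some ((i : Int) + 2)) none)
      then (st.1 + 1, st.2) else st) ((0 : Int), false)
    = (((List.range l.length).countP (condA2 l) : Int), (List.range l.length).any (condA1 l)) := by
  have hfun : (fun (st : Int × Bool) i =>
      let st := if i + 2 < l.length && (l.getD i ' ' == l.getD (i + 2) ' ')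
                then (st.1, true) else st
      if i + 1 < l.length &&
         PySem.Chars.isIn (PySem.List.slice l (some (i : Int)) (some ((i : Int) + 2)))
                          (PySem.List.slice l (some ((i : Int) + 2)) none)
      then (st.1 + 1, st.2) else st)
      = (fun (st : Int × Bool) i =>
          ((fun (a : Int) i => if condA2 l i then a + 1 else a) st.1 i,
           (fun (b : Bool) i => if condA1 l i then true else b) st.2 i)) := by
    funext st i
    simp only [condA1, condA2, slice_pair, slice_tail]
    split_ifs <;> simp_all
  rw [hfun, PySem.List.foldl_prod_mk (f := fun (a : Int) i => if condA2 l i then a + 1 else a)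
    (g := fun (b : Bool) i => if condA1 l i then true else b)]
  rw [PySem.List.foldl_if_add_one, PySem.List.foldl_if_true_eq]
  simp

lemma niceA_iff (l : List Char) : part2NiceA l = true ↔ DoubP l ∧ SpP l := by
  unfold part2NiceA
  simp only [foldA_eq]
  simp only [Bool.and_eq_true, bne_iff_ne, ne_eq, Nat.cast_eq_zero, List.any_eq_true,
    List.mem_range]
  constructor
  · rintro ⟨hc, i, hi, h1⟩
    have hex : ∃ x, x < l.length ∧ condA2 l x = true := by
      by_contra hno
      push Not at hno
      refine hc (List.countP_eq_zero.mpr ?_)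
      intro x hx
      simpa using hno x (List.mem_range.mp hx)
    obtain ⟨x, _, hx⟩ := hex
    obtain ⟨hx1, j, hij, hj, heq⟩ := (condA2_iff l x).mp hx
    obtain ⟨hi2, heq1⟩ := (condA1_iff l i).mp h1
    exact ⟨⟨x, j, hij, hj, heq.symm⟩, ⟨i, hi2, heq1⟩⟩
  · rintro ⟨⟨i, j, hij, hj, heq⟩, k, hk2, hkeq⟩
    constructor
    · intro hzero
      have := List.countP_eq_zero.mp hzero i (List.mem_range.mpr (by omega))
      rw [condA2_iff l i] at this
      push Not at this
      exact absurd heq.symm (this (by omega) j hij hj)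
    · exact ⟨k, by omega, (condA1_iff l k).mpr ⟨hk2, hkeq⟩⟩

def bstate (l : List Char) (m : Nat) : PySem.Dict (Char × Char) Nat × Bool × Bool :=
  (List.range m).foldl (part2BStep l) (PySem.Dict.empty, false, false)

lemma binv (l : List Char) (m : Nat) :
    (∀ p k, (bstate l m).1.get? p = some k → k < m ∧ pairAt l k = p ∧ ∀ k' < k, pairAt l k' ≠ p) ∧
    (∀ k, k < m → ∃ k0, k0 ≤ k ∧ (bstate l m).1.get? (pairAt l k) = some k0) ∧
    ((bstate l m).2.1 = true ↔ ∃ i j, i + 2 ≤ j ∧ j < m ∧ pairAt l i = pairAt l j) ∧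
    ((bstate l m).2.2 = true ↔ ∃ j, j < m ∧ j + 2 < l.length ∧ l.getD j ' ' = l.getD (j + 2) ' ') := by
  induction m with
  | zero =>
    simp [bstate, PySem.Dict.get?_empty]
  | succ m ih =>
    obtain ⟨ih1, ih2, ih3, ih4⟩ := ih
    have hstep : bstate l (m + 1) = part2BStep l (bstate l m) m := by
      simp [bstate, List.range_succ]
    rw [hstep]
    have hpm : (l.getD m ' ', l.getD (m + 1) ' ') = pairAt l m := rfl
    have htrip :
        ((if m + 2 < l.length && (l.getD m ' ' == l.getD (m + 2) ' ') then true else (bstate l m).2.2) = true ↔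
          ∃ j, j < m + 1 ∧ j + 2 < l.length ∧ l.getD j ' ' = l.getD (j + 2) ' ') := by
      split_ifs with hc
      · simp only [true_iff]
        simp at hc
        exact ⟨m, by omega, hc.1, hc.2⟩
      · rw [ih4]
        simp at hc
        constructor
        · rintro ⟨j, hj, h2, he⟩; exact ⟨j, by omega, h2, he⟩
        · rintro ⟨j, hj, h2, he⟩
          refine ⟨j, ?_, h2, he⟩
          rcases Nat.lt_succ_iff_lt_or_eq.mp hj with h | rfl
          · exact h
          · exact absurd he (hc h2)
    cases hg : (bstate l m).1.get? (pairAt l m) with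
    | none =>
      have hred : part2BStep l (bstate l m) m =
          ((bstate l m).1.insert (pairAt l m) m, (bstate l m).2.1,
           if m + 2 < l.length && (l.getD m ' ' == l.getD (m + 2) ' ') then true
           else (bstate l m).2.2) := by
        unfold part2BStep
        rw [hpm, hg]
      rw [hred]
      refine ⟨?_, ?_, ?_, htrip⟩
      · intro p k hk
        rw [PySem.Dict.get?_insert] at hk
        split_ifs at hk with hp
        · cases hk
          subst hp
          refine ⟨by omega, rfl, ?_⟩
          intro k' hk' hne
          obtain ⟨k0, _, hk0⟩ := ih2 k' hk'
          rw [hne] at hk0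
          rw [hk0] at hg
          cases hg
        · obtain ⟨h1, h2, h3⟩ := ih1 p k hk
          exact ⟨by omega, h2, h3⟩
      · intro k hk
        rcases Nat.lt_succ_iff_lt_or_eq.mp hk with h | rfl
        · obtain ⟨k0, hk0le, hk0⟩ := ih2 k h
          refine ⟨k0, hk0le, ?_⟩
          rw [PySem.Dict.get?_insert]
          split_ifs with hp
          · rw [hp] at hk0; rw [hk0] at hg; cases hg
          · exact hk0
        · exact ⟨k, le_refl k, by rw [PySem.Dict.get?_insert]; simp⟩
      · show (bstate l m).2.1 = true ↔ _
        rw [ih3]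
        constructor
        · rintro ⟨i, j, hij, hj, he⟩; exact ⟨i, j, hij, by omega, he⟩
        · rintro ⟨i, j, hij, hj, he⟩
          refine ⟨i, j, hij, ?_, he⟩
          rcases Nat.lt_succ_iff_lt_or_eq.mp hj with h | rfl
          · exact h
          · obtain ⟨k0, _, hk0⟩ := ih2 i (by omega)
            rw [he] at hk0
            rw [hk0] at hg
            cases hg
    | some k =>
      have hred : part2BStep l (bstate l m) m =
          ((bstate l m).1, (if 2 ≤ m - k then true else (bstate l m).2.1),
           if m + 2 < l.length && (l.getD m ' ' == l.getD (m + 2) ' ') then true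
           else (bstate l m).2.2) := by
        unfold part2BStep
        rw [hpm, hg]
      rw [hred]
      obtain ⟨hkm, hkp, hkmin⟩ := ih1 _ k hg
      refine ⟨?_, ?_, ?_, htrip⟩
      · intro p k' hk'
        obtain ⟨h1, h2, h3⟩ := ih1 p k' hk'
        exact ⟨by omega, h2, h3⟩
      · intro k' hk'
        rcases Nat.lt_succ_iff_lt_or_eq.mp hk' with h | rfl
        · exact ih2 k' h
        · exact ⟨k, by omega, hg⟩
      · show (if 2 ≤ m - k then true else (bstate l m).2.1) = true ↔ _
        split_ifs with hc
        · simp only [true_iff]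
          exact ⟨k, m, by omega, by omega, hkp⟩
        · rw [ih3]
          constructor
          · rintro ⟨i, j, hij, hj, he⟩; exact ⟨i, j, hij, by omega, he⟩
          · rintro ⟨i, j, hij, hj, he⟩
            refine ⟨i, j, hij, ?_, he⟩
            rcases Nat.lt_succ_iff_lt_or_eq.mp hj with h | rfl
            · exact h
            · exfalso
              have hki : k ≤ i := by
                by_contra hik
                exact hkmin i (by omega) he
              omega

lemma niceB_iff (l : List Char) : part2NiceB l = true ↔ DoubP l ∧ SpP l := by
  have h := binv l (l.length - 1)
  obtain ⟨_, _, h3, h4⟩ := h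
  have hB : part2NiceB l = ((bstate l (l.length - 1)).2.1 && (bstate l (l.length - 1)).2.2) := rfl
  rw [hB, Bool.and_eq_true, h3, h4]
  constructor
  · rintro ⟨⟨i, j, hij, hj, he⟩, x, hx, h2, he2⟩
    exact ⟨⟨i, j, hij, by omega, he⟩, ⟨x, h2, he2⟩⟩
  · rintro ⟨⟨i, j, hij, hj, he⟩, x, h2, he2⟩
    exact ⟨⟨i, j, hij, by omega, he⟩, ⟨x, by omega, h2, he2⟩⟩

lemma nice_eq (l : List Char) : part2NiceA l = part2NiceB l := by
  cases hA : part2NiceA l <;> cases hB : part2NiceB l <;> try rfl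
  · exact absurd ((niceA_iff l).mpr ((niceB_iff l).mp hB)) (by simp [hA])
  · exact absurd ((niceB_iff l).mpr ((niceA_iff l).mp hA)) (by simp [hB])

-- ===== VERDICT (by name: the statement is the Claim_ definition above) =====
theorem part2_spec : Claim_equal_part2 := by
  intro input _
  unfold Spec_part2 part2 part2_alt
  apply PySem.List.foldl_congr_mem
  intro acc w _
  rw [nice_eq]
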